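-- pv_equiv track=rewrite | github.com/brigante91/SysreptorImporter | NessusBurp2Sysreptoraggrega.py | join_unique_values
-- ===== SOURCE A (Python) =====
-- def join_unique_values(values, separator=', '):
--     """
--     Unisce valori unici in una stringa separata, rimuovendo duplicati.
--     Mantiene l'ordine alfabetico.
--     """
--     if not values:
--         return ''
--
--     # Filtra valori vuoti e normalizza
--     cleaned_values = []
--     for val in values:
--         if val and str(val).strip():
--             cleaned = str(val).strip()
--             if cleaned not in cleaned_values:
--                 cleaned_values.append(cleaned)
--
--     # Ordina alfabeticamente
--     cleaned_values.sort()
--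
--     return separator.join(cleaned_values) if cleaned_values else ''
-- ===== SOURCE B (Python) =====
-- def join_unique_values(values, separator=', '):
--     # sort-then-adjacent-dedup instead of A's dedup-with-membership-scan-then-sort
--     cleaned = [str(val).strip() for val in values if val and str(val).strip()]
--     cleaned.sort()
--     out = []
--     for c in cleaned:
--         if not out or out[-1] != c:
--             out.append(c)
--     return separator.join(out)
-- ===== Notes on version B (the rewrite author's own statement) =====
-- stated objective: faster
-- what changed: A dedups with an O(n) membership scan inside the loop and then sorts; B collects all cleaned values, sorts once, and dedups by a single adjacency pass over the sorted list.
import Mathlib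
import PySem

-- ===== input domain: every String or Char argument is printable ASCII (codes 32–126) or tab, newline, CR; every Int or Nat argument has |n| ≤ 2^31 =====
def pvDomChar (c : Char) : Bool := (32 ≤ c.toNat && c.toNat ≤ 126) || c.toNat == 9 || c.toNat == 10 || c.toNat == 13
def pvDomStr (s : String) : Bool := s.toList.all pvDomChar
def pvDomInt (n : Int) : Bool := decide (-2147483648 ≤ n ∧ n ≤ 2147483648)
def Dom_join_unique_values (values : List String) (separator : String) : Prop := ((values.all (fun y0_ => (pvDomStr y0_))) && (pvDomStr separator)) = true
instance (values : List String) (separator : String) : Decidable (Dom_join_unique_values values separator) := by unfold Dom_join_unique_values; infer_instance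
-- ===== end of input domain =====

-- B replaces A's dedup-with-membership-scan-then-sort by collect-all, sort once, dedup adjacent duplicates in one pass (alternative decomposition).

-- ===== PORT A =====
def join_unique_values (values : List String) (separator : String) : String :=
  if values = [] then "" else
  let cleaned_values := values.foldl (fun acc val =>
    if val ≠ "" ∧ PySem.Str.strip val ≠ "" then
      let cleaned := PySem.Str.strip val
      if cleaned ∈ acc then acc else acc ++ [cleaned]
    else acc) []
  let cleaned_values := PySem.List.sorted cleaned_values (fun x => x) false
  if cleaned_values ≠ [] then PySem.Str.join separator cleaned_values else ""

-- ===== PORT B =====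
def join_unique_values_alt (values : List String) (separator : String) : String :=
  let cleaned := (values.filter (fun val => decide (val ≠ "") && decide (PySem.Str.strip val ≠ ""))).map PySem.Str.strip
  let cleaned := PySem.List.sorted cleaned (fun x => x) false
  let out := cleaned.foldl (fun out c =>
    if out = [] ∨ out.getLast? ≠ some c then out ++ [c] else out) []
  PySem.Str.join separator out

-- ===== PRECONDITION & SPEC =====
def Spec_join_unique_values (values : List String) (separator : String) (out : String) : Prop := out = join_unique_values_alt values separator
instance (values : List String) (separator : String) (out : String) : Decidable (Spec_join_unique_values values separator out) := by unfold Spec_join_unique_values; infer_instance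

-- ===== CLAIM (what is proved, stated in full; the proofs are below) =====
def Claim_equal_join_unique_values : Prop := ∀ (values : List String) (separator : String), Dom_join_unique_values values separator → Spec_join_unique_values values separator (join_unique_values values separator)

-- ===== LEMMAS AND PROOFS =====

-- in a strictly increasing list every element is ≤ the last one
theorem pv_le_getLast {l : List String} {x last : String}
    (hp : l.Pairwise (· < ·)) (hx : x ∈ l) (hl : l.getLast? = some last) : x ≤ last := by
  induction l with
  | nil => cases hx
  | cons a t ih =>
    rcases List.pairwise_cons.mp hp with ⟨ha, hpt⟩
    cases t with
    | nil =>
      simp only [List.getLast?_singleton, Option.some.injEq] at hl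
      simp only [List.mem_singleton] at hx
      simp [hx, hl]
    | cons b u =>
      rw [List.getLast?_cons_cons] at hl
      rcases List.mem_cons.mp hx with rfl | hx'
      · exact le_of_lt (ha last (List.mem_of_getLast? hl))
      · exact ih hpt hx' hl

-- invariant of B's adjacency-dedup fold over a ≤-sorted list
theorem pv_dd_invariant (s : List String) : ∀ (acc : List String),
    acc.Pairwise (· < ·) → s.Pairwise (· ≤ ·) →
    (∀ a ∈ acc, ∀ b ∈ s, a ≤ b) →
    ((s.foldl (fun out c => if out = [] ∨ out.getLast? ≠ some c then out ++ [c] else out) acc).Pairwise (· < ·)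
      ∧ ∀ x, (x ∈ s.foldl (fun out c => if out = [] ∨ out.getLast? ≠ some c then out ++ [c] else out) acc ↔ x ∈ acc ∨ x ∈ s)) := by
  induction s with
  | nil => intro acc hacc _ _; simpa using hacc
  | cons c t ih =>
    intro acc hacc hs hle
    rcases List.pairwise_cons.mp hs with ⟨hc, hst⟩
    by_cases hcond : acc = [] ∨ acc.getLast? ≠ some c
    · -- append c
      have hacc' : (acc ++ [c]).Pairwise (· < ·) := by
        rw [List.pairwise_append]
        refine ⟨hacc, by simp, ?_⟩
        intro a ha b hb
        rw [List.mem_singleton.mp hb]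
        have hale : a ≤ c := hle a ha c (List.mem_cons_self ..)
        rcases hale.lt_or_eq with h | h
        · exact h
        · exfalso
          rcases hcond with h0 | hne
          · rw [h0] at ha; cases ha
          · have hne0 : acc ≠ [] := fun h' => by rw [h'] at ha; cases ha
            obtain ⟨last, hlast⟩ : ∃ l, acc.getLast? = some l := by
              cases e : acc.getLast? with
              | none => exact absurd (List.getLast?_eq_none_iff.mp e) hne0
              | some l => exact ⟨l, rfl⟩
            have h1 : a ≤ last := pv_le_getLast hacc ha hlast
            have h2 : last ≤ c := hle last (List.mem_of_getLast? hlast) c (List.mem_cons_self ..)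
            apply hne
            rw [hlast, le_antisymm h2 (h ▸ h1)]
      have hle' : ∀ a ∈ acc ++ [c], ∀ b ∈ t, a ≤ b := by
        intro a ha b hb
        rcases List.mem_append.mp ha with h | h
        · exact hle a h b (List.mem_cons_of_mem _ hb)
        · rw [List.mem_singleton] at h; subst h; exact hc b hb
      have hrec := ih (acc ++ [c]) hacc' hst hle'
      simp only [List.foldl_cons]
      rw [if_pos hcond]
      refine ⟨hrec.1, fun x => ?_⟩
      rw [hrec.2 x]
      simp [List.mem_append, or_assoc]
    · -- skip: last of acc already equals c, so c ∈ acc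
      have h2 : acc.getLast? = some c := by
        by_contra hne; exact hcond (Or.inr hne)
      have hcm : c ∈ acc := List.mem_of_getLast? h2
      have hle' : ∀ a ∈ acc, ∀ b ∈ t, a ≤ b := fun a ha b hb => hle a ha b (List.mem_cons_of_mem _ hb)
      have hrec := ih acc hacc hst hle'
      simp only [List.foldl_cons]
      rw [if_neg hcond]
      refine ⟨hrec.1, fun x => ?_⟩
      rw [hrec.2 x]
      constructor
      · rintro (h | h)
        · exact Or.inl h
        · exact Or.inr (List.mem_cons_of_mem _ h)
      · rintro (h | h)
        · exact Or.inl h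
        · rcases List.mem_cons.mp h with rfl | h'
          · exact Or.inl hcm
          · exact Or.inr h'

-- A's accumulation loop over filtered values is exactly set-of-list of the cleaned values
theorem pv_A_loop (values : List String) :
    values.foldl (fun acc val =>
      if val ≠ "" ∧ PySem.Str.strip val ≠ "" then
        (if PySem.Str.strip val ∈ acc then acc else acc ++ [PySem.Str.strip val])
      else acc) [] =
    PySem.Set.ofList ((values.filter (fun val => decide (val ≠ "") && decide (PySem.Str.strip val ≠ ""))).map PySem.Str.strip) := by
  rw [PySem.Set.ofList_eq_foldl, List.foldl_map]
  rw [PySem.List.foldl_ite_eq_foldl_filter (p := fun val => val ≠ "" ∧ PySem.Str.strip val ≠ "")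
      (f := fun acc val => if PySem.Str.strip val ∈ acc then acc else acc ++ [PySem.Str.strip val])]
  have hfilter : (values.filter fun val => decide (val ≠ "" ∧ PySem.Str.strip val ≠ "")) =
      (values.filter (fun val => decide (val ≠ "") && decide (PySem.Str.strip val ≠ ""))) := by
    apply List.filter_congr; intro x _; simp
  rw [hfilter]
  apply PySem.List.foldl_congr_mem
  intro acc x _
  simp [PySem.Set.add, PySem.Set.contains]

-- the two result lists coincide
theorem pv_lists_eq (values : List String) :
    PySem.List.sorted (values.foldl (fun acc val =>
      if val ≠ "" ∧ PySem.Str.strip val ≠ "" then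
        (if PySem.Str.strip val ∈ acc then acc else acc ++ [PySem.Str.strip val])
      else acc) []) (fun x => x) false =
    (PySem.List.sorted ((values.filter (fun val => decide (val ≠ "") && decide (PySem.Str.strip val ≠ ""))).map PySem.Str.strip) (fun x => x) false).foldl
      (fun out c => if out = [] ∨ out.getLast? ≠ some c then out ++ [c] else out) [] := by
  rw [pv_A_loop]
  set cleaned := (values.filter (fun val => decide (val ≠ "") && decide (PySem.Str.strip val ≠ ""))).map PySem.Str.strip with hcl
  set s := PySem.List.sorted cleaned (fun x => x) false with hsdef
  have hs : s.Pairwise (· ≤ ·) := by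
    simpa using PySem.List.sorted_pairwise (xs := cleaned) (key := fun x => x)
  obtain ⟨hp, hm⟩ := pv_dd_invariant s [] (by simp) hs (by simp)
  set r := s.foldl (fun out c => if out = [] ∨ out.getLast? ≠ some c then out ++ [c] else out) [] with hrdef
  have hmem : ∀ x, x ∈ r ↔ x ∈ PySem.Set.ofList cleaned := by
    intro x
    rw [hm x, PySem.Set.mem_ofList]
    simp [hsdef, PySem.List.mem_sorted]
  have hperm : r.Perm (PySem.Set.ofList cleaned) := by
    rw [List.perm_ext_iff_of_nodup (hp.nodup) (PySem.Set.nodup_ofList cleaned)]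
    exact hmem
  exact PySem.List.sorted_eq_of_perm_of_pairwise_lt (PySem.Set.ofList cleaned) r (fun x => x) hperm hp

-- ===== VERDICT (by name: the statement is the Claim_ definition above) =====
theorem join_unique_values_spec : Claim_equal_join_unique_values := by
  intro values separator _
  unfold Spec_join_unique_values join_unique_values join_unique_values_alt
  by_cases hv : values = []
  · subst hv
    show ("" : String) = PySem.Str.join separator _
    rfl
  · simp only [if_neg hv]
    rw [pv_lists_eq values]
    split
    · rfl
    · next h =>
      rw [not_ne_iff.mp h]
      rfl
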